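-- pv_equiv track=rewrite | github.com/matz-d/daytrace-plugin | scripts/skill_miner_prepare.py | _combine_user_signal_strength
-- ===== SOURCE A (Python) =====
-- def _combine_user_signal_strength(levels: list[str]) -> str:
--     normalized = {str(value).strip() for value in levels if str(value).strip()}
--     if not normalized:
--         return "unknown"
--     if "low" in normalized:
--         return "low"
--     if "medium" in normalized:
--         return "medium"
--     if "unknown" in normalized:
--         return "unknown"
--     return "high"
-- ===== SOURCE B (Python) =====
-- def _combine_user_signal_strength(levels: list[str]) -> str:
--     rank = {"low": 0, "medium": 1, "unknown": 2}
--     best = 4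
--     for value in levels:
--         s = str(value).strip()
--         if s:
--             r = rank.get(s, 3)
--             if r < best:
--                 best = r
--     if best == 4:
--         return "unknown"
--     return ["low", "medium", "unknown", "high"][best]
-- ===== Notes on version B (the rewrite author's own statement) =====
-- stated objective: alternative
-- what changed: Replaces the set comprehension plus four sequential membership checks with a single pass that min-reduces a numeric priority rank per element and maps the minimum back to its label.
import Mathlib
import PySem

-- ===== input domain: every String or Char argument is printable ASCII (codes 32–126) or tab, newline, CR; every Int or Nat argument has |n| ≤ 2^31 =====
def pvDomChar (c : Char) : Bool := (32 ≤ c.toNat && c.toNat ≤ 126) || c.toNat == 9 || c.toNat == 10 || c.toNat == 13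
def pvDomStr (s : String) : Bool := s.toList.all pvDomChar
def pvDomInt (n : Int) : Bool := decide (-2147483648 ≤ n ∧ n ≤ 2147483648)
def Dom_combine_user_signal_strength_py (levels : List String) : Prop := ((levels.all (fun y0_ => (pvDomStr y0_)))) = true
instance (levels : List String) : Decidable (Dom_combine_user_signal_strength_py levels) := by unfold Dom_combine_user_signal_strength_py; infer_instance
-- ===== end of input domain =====

-- B replaces A's set comprehension + four sequential membership checks with one pass
-- min-reducing a numeric rank per label (alternative decomposition; same cost).


-- ===== PORT A =====
def combine_user_signal_strength_py (levels : List String) : String :=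
  let normalized : PySem.Set String :=
    PySem.Set.ofList ((levels.map (fun v => PySem.Str.strip v)).filter (fun s => s ≠ ""))
  if normalized = [] then "unknown"
  else if "low" ∈ normalized then "low"
  else if "medium" ∈ normalized then "medium"
  else if "unknown" ∈ normalized then "unknown"
  else "high"

-- ===== PORT B =====
def combine_user_signal_strength_py_alt (levels : List String) : String :=
  let rank : PySem.Dict String Nat := PySem.Dict.ofList [("low", 0), ("medium", 1), ("unknown", 2)]
  let best : Nat := levels.foldl (fun best v =>
      let s := PySem.Str.strip v
      if s ≠ "" then
        let r := rank.getD s 3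
        if r < best then r else best
      else best) 4
  if best = 4 then "unknown"
  else ["low", "medium", "unknown", "high"].getD best "unknown"  -- index always in range; default never used

-- ===== PRECONDITION & SPEC =====
def Spec_combine_user_signal_strength_py (levels : List String) (out : String) : Prop := out = combine_user_signal_strength_py_alt levels
instance (levels : List String) (out : String) : Decidable (Spec_combine_user_signal_strength_py levels out) := by unfold Spec_combine_user_signal_strength_py; infer_instance

-- ===== CLAIM (what is proved, stated in full; the proofs are below) =====
def Claim_equal_combine_user_signal_strength_py : Prop := ∀ (levels : List String), Dom_combine_user_signal_strength_py levels → Spec_combine_user_signal_strength_py levels (combine_user_signal_strength_py levels)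

-- ===== LEMMAS AND PROOFS =====

-- the stripped, non-blank elements (with duplicates), in order
def pvKept (levels : List String) : List String :=
  (levels.map (fun v => PySem.Str.strip v)).filter (fun s => s ≠ "")

-- B's rank table as a plain function
def pvRnk (s : String) : Nat :=
  if s = "low" then 0 else if s = "medium" then 1 else if s = "unknown" then 2 else 3

lemma pvRnk_getD (s : String) :
    (PySem.Dict.ofList [("low", 0), ("medium", 1), ("unknown", 2)] : PySem.Dict String Nat).getD s 3
      = pvRnk s := by
  have h : (PySem.Dict.ofList [("low", 0), ("medium", 1), ("unknown", 2)] : PySem.Dict String Nat)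
      = PySem.Dict.mk [("low", 0), ("medium", 1), ("unknown", 2)] := by rfl
  rw [h]
  simp only [PySem.Dict.getD_eq_get?_getD, PySem.Dict.get?_mk_cons, pvRnk]
  split_ifs <;> simp_all
  rfl

lemma pvRnk_le3 (s : String) : pvRnk s ≤ 3 := by
  unfold pvRnk; split_ifs <;> omega

lemma pvRnk_eq0 {s : String} (h : pvRnk s = 0) : s = "low" := by
  unfold pvRnk at h; split_ifs at h <;> simp_all

lemma pvRnk_eq1 {s : String} (h : pvRnk s = 1) : s = "medium" := by
  unfold pvRnk at h; split_ifs at h <;> simp_all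

lemma pvRnk_eq2 {s : String} (h : pvRnk s = 2) : s = "unknown" := by
  unfold pvRnk at h; split_ifs at h <;> simp_all

-- the min-reduction over the kept elements' ranks
def pvMin (L : List String) (b : Nat) : Nat :=
  L.foldl (fun b s => if pvRnk s < b then pvRnk s else b) b

-- B's loop computes pvMin over pvKept
lemma pvFoldB (levels : List String) : ∀ b : Nat,
    levels.foldl (fun best v =>
      let s := PySem.Str.strip v
      if s ≠ "" then
        let r := (PySem.Dict.ofList [("low", 0), ("medium", 1), ("unknown", 2)] : PySem.Dict String Nat).getD s 3
        if r < best then r else best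
      else best) b
    = pvMin (pvKept levels) b := by
  induction levels with
  | nil => intro b; rfl
  | cons v t ih =>
    intro b
    rw [List.foldl_cons]
    by_cases h : PySem.Str.strip v = ""
    · have e1 : (let s := PySem.Str.strip v
          if s ≠ "" then
            let r := (PySem.Dict.ofList [("low", 0), ("medium", 1), ("unknown", 2)] : PySem.Dict String Nat).getD s 3
            if r < b then r else b
          else b) = b := by simp [h]
      rw [e1, ih]
      simp [pvKept, pvMin, h]
    · have e1 : (let s := PySem.Str.strip v
          if s ≠ "" then
            let r := (PySem.Dict.ofList [("low", 0), ("medium", 1), ("unknown", 2)] : PySem.Dict String Nat).getD s 3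
            if r < b then r else b
          else b)
          = (if pvRnk (PySem.Str.strip v) < b then pvRnk (PySem.Str.strip v) else b) := by
        simp [h, pvRnk_getD]
      rw [e1, ih]
      simp [pvKept, pvMin, h]

lemma pvMin_le_init (L : List String) : ∀ b, pvMin L b ≤ b := by
  induction L with
  | nil => intro b; simp [pvMin]
  | cons x t ih =>
    intro b
    simp only [pvMin, List.foldl_cons]
    have := ih (if pvRnk x < b then pvRnk x else b)
    unfold pvMin at this
    split_ifs at this ⊢ <;> omega

lemma pvMin_le_mem (L : List String) : ∀ b, ∀ x ∈ L, pvMin L b ≤ pvRnk x := by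
  induction L with
  | nil => intro b x hx; simp at hx
  | cons y t ih =>
    intro b x hx
    simp only [pvMin, List.foldl_cons]
    rcases List.mem_cons.1 hx with h | h
    · subst h
      have := pvMin_le_init t (if pvRnk x < b then pvRnk x else b)
      unfold pvMin at this
      split_ifs at this ⊢ <;> omega
    · exact ih _ x h

lemma pvMin_attained (L : List String) : ∀ b, pvMin L b = b ∨ ∃ x ∈ L, pvMin L b = pvRnk x := by
  induction L with
  | nil => intro b; left; rfl
  | cons y t ih =>
    intro b
    simp only [pvMin, List.foldl_cons]
    rcases ih (if pvRnk y < b then pvRnk y else b) with h | ⟨x, hx, h⟩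
    · unfold pvMin at h
      by_cases hc : pvRnk y < b
      · right
        refine ⟨y, List.mem_cons_self, ?_⟩
        simp only [if_pos hc] at h ⊢
        exact h
      · left
        simp only [if_neg hc] at h ⊢
        exact h
    · right; exact ⟨x, List.mem_cons_of_mem _ hx, h⟩

lemma pvOfList_nil_iff (xs : List String) : PySem.Set.ofList xs = [] ↔ xs = [] := by
  constructor
  · intro h
    cases xs with
    | nil => rfl
    | cons x t => simp [PySem.Set.ofList_cons] at h
  · intro h; subst h; rfl

-- ===== VERDICT (by name: the statement is the Claim_ definition above) =====
theorem combine_user_signal_strength_py_spec : Claim_equal_combine_user_signal_strength_py := by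
  intro levels _
  unfold Spec_combine_user_signal_strength_py
  simp only [combine_user_signal_strength_py, combine_user_signal_strength_py_alt]
  rw [pvFoldB]
  have hkeq : (levels.map (fun v => PySem.Str.strip v)).filter (fun s => s ≠ "") = pvKept levels := rfl
  rw [hkeq]
  set k := pvKept levels with hk
  by_cases hnil : k = []
  · rw [if_pos ((pvOfList_nil_iff k).2 hnil)]
    have h4 : pvMin k 4 = 4 := by rw [hnil]; rfl
    rw [if_pos h4]
  · rw [if_neg (fun hc => hnil ((pvOfList_nil_iff k).1 hc))]
    by_cases hl : "low" ∈ k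
    · rw [if_pos ((PySem.Set.mem_ofList _ _).2 hl)]
      have h1 := pvMin_le_mem k 4 _ hl
      have h0 : pvRnk "low" = 0 := by decide
      have hm0 : pvMin k 4 = 0 := by omega
      rw [hm0]; rfl
    · rw [if_neg (fun hc => hl ((PySem.Set.mem_ofList _ _).1 hc))]
      by_cases hm : "medium" ∈ k
      · rw [if_pos ((PySem.Set.mem_ofList _ _).2 hm)]
        have h1 := pvMin_le_mem k 4 _ hm
        have h0 : pvRnk "medium" = 1 := by decide
        have hne0 : pvMin k 4 ≠ 0 := by
          intro h
          rcases pvMin_attained k 4 with ha | ⟨x, hx, ha⟩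
          · omega
          · exact hl ((pvRnk_eq0 (s := x) (by omega)) ▸ hx)
        have hm1 : pvMin k 4 = 1 := by omega
        rw [hm1]; rfl
      · rw [if_neg (fun hc => hm ((PySem.Set.mem_ofList _ _).1 hc))]
        by_cases hu : "unknown" ∈ k
        · rw [if_pos ((PySem.Set.mem_ofList _ _).2 hu)]
          have h1 := pvMin_le_mem k 4 _ hu
          have h0 : pvRnk "unknown" = 2 := by decide
          have hne0 : pvMin k 4 ≠ 0 := by
            intro h
            rcases pvMin_attained k 4 with ha | ⟨x, hx, ha⟩
            · omega
            · exact hl ((pvRnk_eq0 (s := x) (by omega)) ▸ hx)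
          have hne1 : pvMin k 4 ≠ 1 := by
            intro h
            rcases pvMin_attained k 4 with ha | ⟨x, hx, ha⟩
            · omega
            · exact hm ((pvRnk_eq1 (s := x) (by omega)) ▸ hx)
          have hm2 : pvMin k 4 = 2 := by omega
          rw [hm2]; rfl
        · rw [if_neg (fun hc => hu ((PySem.Set.mem_ofList _ _).1 hc))]
          obtain ⟨y, hy⟩ := List.exists_mem_of_ne_nil k hnil
          have h1 := pvMin_le_mem k 4 _ hy
          have h3 := pvRnk_le3 y
          have hne0 : pvMin k 4 ≠ 0 := by
            intro h
            rcases pvMin_attained k 4 with ha | ⟨x, hx, ha⟩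
            · omega
            · exact hl ((pvRnk_eq0 (s := x) (by omega)) ▸ hx)
          have hne1 : pvMin k 4 ≠ 1 := by
            intro h
            rcases pvMin_attained k 4 with ha | ⟨x, hx, ha⟩
            · omega
            · exact hm ((pvRnk_eq1 (s := x) (by omega)) ▸ hx)
          have hne2 : pvMin k 4 ≠ 2 := by
            intro h
            rcases pvMin_attained k 4 with ha | ⟨x, hx, ha⟩
            · omega
            · exact hu ((pvRnk_eq2 (s := x) (by omega)) ▸ hx)
          have hm3 : pvMin k 4 = 3 := by omega
          rw [hm3]; rfl
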